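-- pv_equiv track=rewrite | github.com/lypavel/dvmn-self-storage | storage/views.py | categorize_boxes
-- ===== SOURCE A (Python) =====
-- def categorize_boxes(boxes):
--     boxes_to_3 = []
--     boxes_to_10 = []
--     boxes_from_10 = []
--
--     for box in boxes:
--         match box['type']:
--             case '3':
--                 boxes_to_3.append(box)
--             case '10':
--                 boxes_to_10.append(box)
--             case '10+':
--                 boxes_from_10.append(box)
--
--     return {
--         'boxes_to_3': boxes_to_3,
--         'boxes_to_10': boxes_to_10,
--         'boxes_from_10': boxes_from_10,
--         'all_boxes': boxes
--     }
-- ===== SOURCE B (Python) =====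
-- def categorize_boxes(boxes):
--     return {
--         'boxes_to_3': [box for box in boxes if box['type'] == '3'],
--         'boxes_to_10': [box for box in boxes if box['type'] == '10'],
--         'boxes_from_10': [box for box in boxes if box['type'] == '10+'],
--         'all_boxes': boxes,
--     }
-- ===== Notes on version B (the rewrite author's own statement) =====
-- stated objective: simpler
-- what changed: Replaces the single dispatch loop with three mutable accumulators by three independent filtering comprehensions, one per category, returned directly in the result dict.
import Mathlib
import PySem

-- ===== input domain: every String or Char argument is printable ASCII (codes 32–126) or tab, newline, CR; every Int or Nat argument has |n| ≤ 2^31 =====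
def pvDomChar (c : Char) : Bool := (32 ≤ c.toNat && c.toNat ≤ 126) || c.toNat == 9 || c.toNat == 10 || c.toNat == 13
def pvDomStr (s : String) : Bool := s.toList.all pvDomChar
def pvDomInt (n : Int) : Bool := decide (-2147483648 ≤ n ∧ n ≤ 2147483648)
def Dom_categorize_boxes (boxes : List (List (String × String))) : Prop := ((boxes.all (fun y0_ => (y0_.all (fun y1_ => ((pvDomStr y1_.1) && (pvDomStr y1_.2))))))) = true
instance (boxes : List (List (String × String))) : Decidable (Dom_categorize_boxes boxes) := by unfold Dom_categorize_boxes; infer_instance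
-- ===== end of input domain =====

-- B replaces A's single dispatch loop by three independent filtering passes (simpler decomposition);
-- equivalence of the RETURN value is proved on inputs where every box has a 'type' key (else Python raises KeyError).

-- ===== PORT A =====
-- box['type'] on an association list: first pair whose key matches (KeyError = none, excluded by Pre_)
def pvLookup (box : List (String × String)) (k : String) : Option String :=
  (box.find? (fun p => p.1 == k)).map (·.2)

def categorize_boxes (boxes : List (List (String × String))) : List (String × List (List (String × String))) :=
  let st := boxes.foldl
    (fun (st : List (List (String × String)) × List (List (String × String)) × List (List (String × String))) box =>
      match pvLookup box "type" with
      | some "3" => (st.1 ++ [box], st.2.1, st.2.2)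
      | some "10" => (st.1, st.2.1 ++ [box], st.2.2)
      | some "10+" => (st.1, st.2.1, st.2.2 ++ [box])
      | _ => st)
    ([], [], [])
  [("boxes_to_3", st.1), ("boxes_to_10", st.2.1), ("boxes_from_10", st.2.2), ("all_boxes", boxes)]

-- ===== PORT B =====
def categorize_boxes_alt (boxes : List (List (String × String))) : List (String × List (List (String × String))) :=
  [("boxes_to_3", boxes.filter (fun box => pvLookup box "type" == some "3")),
   ("boxes_to_10", boxes.filter (fun box => pvLookup box "type" == some "10")),
   ("boxes_from_10", boxes.filter (fun box => pvLookup box "type" == some "10+")),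
   ("all_boxes", boxes)]

-- ===== PRECONDITION & SPEC =====
-- Pre_ excludes boxes without a 'type' key, on which both Pythons raise KeyError.
def Pre_categorize_boxes (boxes : List (List (String × String))) : Prop :=
  (boxes.all (fun box => box.any (fun p => p.1 == "type"))) = true
instance (boxes : List (List (String × String))) : Decidable (Pre_categorize_boxes boxes) := by
  unfold Pre_categorize_boxes; infer_instance

def pvWitness_categorize_boxes : (List (List (String × String))) :=
  [[("type", "3"), ("id", "1")], [("type", "10+")], [("type", "x")]]

def Spec_categorize_boxes (boxes : List (List (String × String))) (out : List (String × List (List (String × String)))) : Prop := out = categorize_boxes_alt boxes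
instance (boxes : List (List (String × String))) (out : List (String × List (List (String × String)))) : Decidable (Spec_categorize_boxes boxes out) := by unfold Spec_categorize_boxes; infer_instance

-- ===== CLAIM (what is proved, stated in full; the proofs are below) =====
def Claim_equal_categorize_boxes : Prop := ∀ (boxes : List (List (String × String))), Dom_categorize_boxes boxes → Pre_categorize_boxes boxes → Spec_categorize_boxes boxes (categorize_boxes boxes)

-- ===== LEMMAS AND PROOFS =====
theorem pv_foldl_filter (boxes : List (List (String × String)))
    (a b c : List (List (String × String))) :
    boxes.foldl
      (fun (st : List (List (String × String)) × List (List (String × String)) × List (List (String × String))) box =>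
        match pvLookup box "type" with
        | some "3" => (st.1 ++ [box], st.2.1, st.2.2)
        | some "10" => (st.1, st.2.1 ++ [box], st.2.2)
        | some "10+" => (st.1, st.2.1, st.2.2 ++ [box])
        | _ => st)
      (a, b, c)
    = (a ++ boxes.filter (fun box => pvLookup box "type" == some "3"),
       b ++ boxes.filter (fun box => pvLookup box "type" == some "10"),
       c ++ boxes.filter (fun box => pvLookup box "type" == some "10+")) := by
  induction boxes generalizing a b c with
  | nil => simp
  | cons box rest ih =>
    rcases h : pvLookup box "type" with _ | t
    · simp [List.foldl_cons, h, ih]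
    · simp only [List.foldl_cons, List.filter_cons, h]
      split <;> simp_all [ih]

-- ===== VERDICT (by name: the statement is the Claim_ definition above) =====
theorem categorize_boxes_spec : Claim_equal_categorize_boxes := by
  intro boxes _ _
  show _ = _
  simp [categorize_boxes, categorize_boxes_alt, pv_foldl_filter]
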